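-- pv_equiv track=rewrite | github.com/danyelf/parse-vtt | gmeet-to-script.py | fix_vtt_format
-- ===== SOURCE A (Python) =====
-- def fix_vtt_format(lines):
--     fixed_lines = []
--     i = 0;
--     while( i < len(lines) ):
--         line = lines[i]
--         if line.strip() == '-' and i + 1 < len(lines) and lines[i + 1].strip() == '':
--             # Skip the next blank line
--             i = i + 1;
--         fixed_lines.append(line)
--         i = i + 1;
--     return ''.join( fixed_lines )
-- ===== SOURCE B (Python) =====
-- def fix_vtt_format(lines):
--     prev = None
--     kept = []
--     for line in lines:
--         if not (line.strip() == '' and prev is not None and prev.strip() == '-'):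
--             kept.append(line)
--         prev = line
--     return ''.join(kept)
-- ===== Notes on version B (the rewrite author's own statement) =====
-- stated objective: simpler
-- what changed: Replaces the index-based while loop with manual skip-ahead by a single stateless look-behind pass: keep a line unless it is blank and the previous line strips to '-'.
import Mathlib
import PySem

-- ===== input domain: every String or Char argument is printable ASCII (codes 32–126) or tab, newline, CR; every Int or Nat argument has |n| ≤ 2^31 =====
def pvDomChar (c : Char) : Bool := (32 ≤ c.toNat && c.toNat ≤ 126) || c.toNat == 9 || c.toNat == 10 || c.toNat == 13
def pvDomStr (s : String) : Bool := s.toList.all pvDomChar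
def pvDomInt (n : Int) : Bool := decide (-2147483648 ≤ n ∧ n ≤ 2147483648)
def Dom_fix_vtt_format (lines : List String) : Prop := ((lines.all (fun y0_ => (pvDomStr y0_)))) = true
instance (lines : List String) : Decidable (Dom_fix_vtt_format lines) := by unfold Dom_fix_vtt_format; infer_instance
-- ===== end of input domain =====

-- B replaces A's index-based while loop (with manual skip of the blank after a '-')
-- by a single look-behind pass keeping each line unless it is blank with a '-' predecessor;
-- objective: simpler.


-- line.strip() == '-'  /  line.strip() == ''
def isDash (s : String) : Bool := PySem.Str.strip s == "-"
def isBlank (s : String) : Bool := PySem.Str.strip s == ""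

-- ===== PORT A =====
-- A's while loop over index i; `fixed` is fixed_lines, appended at the back as in Python.
def fixLoopA (lines : List String) (i : Nat) (fixed : List String) : List String :=
  if h : i < lines.length then
    let line := lines[i]
    -- on the skip condition Python does i = i + 1, appends, then i = i + 1 again (net +2)
    if isDash line && decide (i + 1 < lines.length) && isBlank (lines.getD (i + 1) "") then
      fixLoopA lines (i + 2) (fixed ++ [line])
    else
      fixLoopA lines (i + 1) (fixed ++ [line])
  else fixed
termination_by lines.length - i
decreasing_by all_goals omega

def fix_vtt_format (lines : List String) : String :=
  PySem.Str.join "" (fixLoopA lines 0 [])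

-- ===== PORT B =====
-- B's for loop carrying the previous line; keeps a line unless blank with '-' predecessor.
def prevDash : Option String → Bool
  | some p => isDash p
  | none => false

def altLoopB (prev : Option String) (ls : List String) : List String :=
  match ls with
  | [] => []
  | line :: rest =>
    if isBlank line && prevDash prev then
      altLoopB (some line) rest
    else
      line :: altLoopB (some line) rest

def fix_vtt_format_alt (lines : List String) : String :=
  PySem.Str.join "" (altLoopB none lines)

-- ===== PRECONDITION & SPEC =====
def Spec_fix_vtt_format (lines : List String) (out : String) : Prop := out = fix_vtt_format_alt lines
instance (lines : List String) (out : String) : Decidable (Spec_fix_vtt_format lines out) := by unfold Spec_fix_vtt_format; infer_instance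

-- ===== CLAIM (what is proved, stated in full; the proofs are below) =====
def Claim_equal_fix_vtt_format : Prop := ∀ (lines : List String), Dom_fix_vtt_format lines → Spec_fix_vtt_format lines (fix_vtt_format lines)

-- ===== LEMMAS AND PROOFS =====

-- suffix-level reformulation of A's loop
def gA : List String → List String
  | [] => []
  | x :: [] => [x]
  | x :: y :: rest =>
    if isDash x && isBlank y then
      x :: gA rest
    else
      x :: gA (y :: rest)

-- A's index loop computes acc ++ gA (drop i)
theorem fixLoopA_eq_gA (lines : List String) (i : Nat) (acc : List String) :
    fixLoopA lines i acc = acc ++ gA (lines.drop i) := by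
  induction hn : lines.length - i using Nat.strong_induction_on generalizing i acc with
  | _ n ih =>
    rw [fixLoopA]
    by_cases h : i < lines.length
    · simp only [dif_pos h]
      have hdrop : lines.drop i = lines[i] :: lines.drop (i + 1) :=
        List.drop_eq_getElem_cons h
      by_cases h2 : i + 1 < lines.length
      · have hdrop2 : lines.drop (i + 1) = lines[i+1] :: lines.drop (i + 2) :=
          List.drop_eq_getElem_cons h2
        have hgetD : lines.getD (i + 1) "" = lines[i+1] := List.getD_eq_getElem lines "" h2
        cases hc : (isDash lines[i] && isBlank lines[i+1]) with
        | true =>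
          rw [if_pos (by simp [h2, Bool.and_elim_left hc, Bool.and_elim_right hc])]
          rw [ih (lines.length - (i + 2)) (by omega) (i + 2) _ rfl]
          rw [hdrop, hdrop2, gA, if_pos hc]
          simp
        | false =>
          rw [if_neg (by simp [h2]; intro hd; simpa [hd] using hc)]
          rw [ih (lines.length - (i + 1)) (by omega) (i + 1) _ rfl]
          rw [hdrop, hdrop2, gA, if_neg (by simp [hc]), ← hdrop2]
          simp
      · have hi : i + 1 = lines.length := by omega
        have hdropnil : lines.drop (i + 1) = [] := List.drop_eq_nil_of_le (by omega)
        rw [if_neg (by simp [h2])]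
        rw [ih (lines.length - (i + 1)) (by omega) (i + 1) _ rfl]
        rw [hdrop, hdropnil]
        simp [gA]
    · rw [dif_neg h]
      rw [List.drop_eq_nil_of_le (by omega)]
      simp [gA]

-- B's loop with a non-'-' (or absent) previous line computes gA
theorem altLoopB_eq_gA : ∀ (ls : List String) (p : Option String),
    (prevDash p = false ∨ isBlank (ls.headD "-") = false) →
    altLoopB p ls = gA ls
  | [], p, hp => rfl
  | [x], p, hp => by
    have hkeep : (isBlank x && prevDash p) = false := by
      rcases hp with hp | hp <;> simp_all
    rw [altLoopB, if_neg (by simp [hkeep]), altLoopB, gA]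
  | x :: y :: t, p, hp => by
    have hkeep : (isBlank x && prevDash p) = false := by
      rcases hp with hp | hp <;> simp_all
    rw [altLoopB, if_neg (by simp [hkeep]), gA]
    cases hc : (isDash x && isBlank y) with
    | true =>
      rw [if_pos rfl]
      rw [altLoopB, if_pos (by simp [Bool.and_elim_right hc, prevDash, Bool.and_elim_left hc])]
      congr 1
      apply altLoopB_eq_gA t (some y)
      left
      have hb : isBlank y = true := Bool.and_elim_right hc
      simp [prevDash, isDash, isBlank] at hb ⊢
      simp [hb]
    | false =>
      rw [if_neg (by simp)]
      congr 1
      apply altLoopB_eq_gA (y :: t) (some x)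
      by_cases hd : isDash x = true
      · right
        have : isBlank y = false := by
          cases hby : isBlank y
          · rfl
          · simp [hd, hby] at hc
        simpa using this
      · left; simp [prevDash]; simpa using hd

-- ===== VERDICT (by name: the statement is the Claim_ definition above) =====
theorem fix_vtt_format_spec : Claim_equal_fix_vtt_format := by
  intro lines _
  unfold Spec_fix_vtt_format fix_vtt_format fix_vtt_format_alt
  rw [fixLoopA_eq_gA, altLoopB_eq_gA lines none (Or.inl rfl)]
  simp
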